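-- pv_equiv track=rewrite | github.com/Icln/Algorithm | 프로그래머스/lv2/77885. 2개 이하로 다른 비트/2개 이하로 다른 비트.py | solution
-- ===== SOURCE A (Python) =====
-- def solution(numbers):
--     answer = []
--     for number in numbers:
--         if number % 2 == 0:
--             answer.append(number + 1)
--         else:
--             num = '0' + bin(number)[2:]
--             num = num[:num.rindex('0')] + '10' + num[num.rindex('0') + 2:]
--             answer.append(int(num, 2))
--
--     return answer
-- ===== SOURCE B (Python) =====
-- def solution(numbers):
--     # branch-free closed form: (~n) & (n+1) is n's lowest zero bit; shifting it
--     # right once gives the bit to add for odd n, and max(..., 1) yields the +1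
--     # that even n needs (their lowest zero bit is 1, so the shift gives 0).
--     return [n + max((~n & (n + 1)) >> 1, 1) for n in numbers]
-- ===== Notes on version B (the rewrite author's own statement) =====
-- stated objective: simpler
-- what changed: Replaces the per-element even/odd branch with string formatting, rindex scan, splice and int(...,2) reparse by a single branch-free closed-form bit expression n + max(((~n & (n+1)) >> 1), 1) inside one comprehension.
-- outside the precondition, e.g. on solution([-3]): A returns [11], B returns [-2]; on solution([-5]): A returns [6], B returns [-3]
import Mathlib
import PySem

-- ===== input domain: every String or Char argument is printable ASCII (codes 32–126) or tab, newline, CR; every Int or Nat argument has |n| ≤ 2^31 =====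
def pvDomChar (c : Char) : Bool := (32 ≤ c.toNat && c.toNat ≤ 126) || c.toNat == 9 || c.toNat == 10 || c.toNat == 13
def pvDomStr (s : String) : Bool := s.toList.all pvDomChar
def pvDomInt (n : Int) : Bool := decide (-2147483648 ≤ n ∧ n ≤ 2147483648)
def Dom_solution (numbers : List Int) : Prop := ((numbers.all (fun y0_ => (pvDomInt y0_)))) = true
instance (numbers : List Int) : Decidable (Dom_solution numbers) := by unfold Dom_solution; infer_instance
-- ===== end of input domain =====

-- B replaces A's per-element string format / rindex scan / splice-and-reparse by one branch-free
-- closed-form bit expression (simpler; same per-element loop shape is gone too: a single map).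

-- ===== PORT A =====
-- num.rindex('0'): index of the LAST '0' (Python scans from the right; raises if '0' absent —
-- never reached here since num always starts with '0')
def rindex0 (cs : List Char) : Nat := cs.length - 1 - cs.reverse.findIdx (· == '0')
-- int(num, 2): hand port as the base-2 digit fold, exact on the '0'/'1'-only strings A builds on
-- inputs admitted by Pre_solution (PySem's full int(s, base) parser keeps its digit loop private,
-- so it cannot be characterised in the proofs below)
def intBase2 (cs : List Char) : Int := cs.foldl (fun a c => 2 * a + (if c = '1' then 1 else 0)) 0

def solution (numbers : List Int) : List Int :=
  numbers.foldl (fun answer number =>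
    if PySem.Int.mod number 2 = 0 then
      answer ++ [number + 1]
    else
      -- num = '0' + bin(number)[2:]
      let num := '0' :: (PySem.Int.toBinChars0b number).drop 2
      -- num = num[:num.rindex('0')] + '10' + num[num.rindex('0') + 2:]
      let num2 := num.take (rindex0 num) ++ ['1', '0'] ++ num.drop (rindex0 num + 2)
      answer ++ [intBase2 num2]) []

-- ===== PORT B =====
def solution_alt (numbers : List Int) : List Int :=
  numbers.map (fun n => n + max ((PySem.Int.band (Int.not n) (n + 1)) >>> (1 : Nat)) 1)

-- ===== PRECONDITION & SPEC =====
-- Pre_ restricts to the problem's natural domain: the puzzle guarantees positive numbers, so lists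
-- containing a negative odd element are excluded; on such elements A's "'0' + bin(number)[2:]"
-- splices a string still containing the 'b' of "-0b…" and returns a positive value for a negative
-- input, which B does not try to match.
def Pre_solution (numbers : List Int) : Prop := ∀ n ∈ numbers, n < 0 → PySem.Int.mod n 2 = 0
instance (numbers : List Int) : Decidable (Pre_solution numbers) := by unfold Pre_solution; infer_instance
def pvWitness_solution : List Int := [0, 2, 7, 1023, -4]

def Spec_solution (numbers : List Int) (out : List Int) : Prop := out = solution_alt numbers
instance (numbers : List Int) (out : List Int) : Decidable (Spec_solution numbers out) := by unfold Spec_solution; infer_instance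

-- ===== CLAIM (what is proved, stated in full; the proofs are below) =====
def Claim_equal_solution : Prop := ∀ (numbers : List Int), Dom_solution numbers → Pre_solution numbers → Spec_solution numbers (solution numbers)

-- ===== LEMMAS AND PROOFS =====

-- number of trailing one-bits (proof-side only)
def tz (m : Nat) : Nat :=
  if m % 2 = 1 then tz (m / 2) + 1 else 0
decreasing_by omega

theorem tz_even {m : Nat} (h : m % 2 = 0) : tz m = 0 := by
  rw [tz]; simp [h]

theorem tz_odd {m : Nat} (h : m % 2 = 1) : tz m = tz (m / 2) + 1 := by
  rw [tz]; simp [h]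

-- (2a+u) &&& (2b+v) = 2(a &&& b) + (u &&& v) for bits u v
theorem land_bit (a b u v : Nat) (hu : u < 2) (hv : v < 2) :
    (2 * a + u) &&& (2 * b + v) = 2 * (a &&& b) + (u &&& v) := by
  apply Nat.eq_of_testBit_eq
  intro i
  cases i with
  | zero =>
      simp only [Nat.testBit_zero]
      interval_cases u <;> interval_cases v <;> simp
  | succ i =>
      have h1 : (2 * a + u) / 2 = a := by omega
      have h2 : (2 * b + v) / 2 = b := by omega
      have h3 : (2 * (a &&& b) + (u &&& v)) / 2 = a &&& b := by
        have : u &&& v < 2 := lt_of_le_of_lt Nat.and_le_left hu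
        omega
      rw [Nat.testBit_and, Nat.testBit_succ, Nat.testBit_succ, Nat.testBit_succ, h1, h2, h3,
        Nat.testBit_and]

-- (m+1) - ((m+1) &&& m) is the lowest zero bit of m
theorem lowbit_eq (m : Nat) : (m + 1) - ((m + 1) &&& m) = 2 ^ tz m := by
  induction m using Nat.strong_induction_on with
  | _ m ih =>
    rcases Nat.mod_two_eq_zero_or_one m with h | h
    · -- m even: (m+1) &&& m = m
      obtain ⟨k, rfl⟩ : ∃ k, m = 2 * k + 0 := ⟨m / 2, by omega⟩
      have h1 : (2 * k + 0 + 1) &&& (2 * k + 0) = 2 * k := by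
        have e : 2 * k + 0 + 1 = 2 * k + 1 := by ring
        rw [e, land_bit k k 1 0 (by omega) (by omega), Nat.and_self]; rfl
      rw [tz_even h, h1]
      omega
    · -- m odd: recurse on m / 2
      obtain ⟨k, rfl⟩ : ∃ k, m = 2 * k + 1 := ⟨m / 2, by omega⟩
      have h1 : (2 * k + 1 + 1) &&& (2 * k + 1) = 2 * ((k + 1) &&& k) := by
        have e : 2 * k + 1 + 1 = 2 * (k + 1) + 0 := by ring
        rw [e, land_bit (k + 1) k 0 1 (by omega) (by omega)]; rfl
      have hle : (k + 1) &&& k ≤ k + 1 := Nat.and_le_left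
      have ihh := ih k (by omega)
      have htz : tz (2 * k + 1) = tz k + 1 := by
        rw [tz_odd h, show (2 * k + 1) / 2 = k by omega]
      rw [htz, h1, pow_succ]
      omega

theorem tz_pos {m : Nat} (h : m % 2 = 1) : 1 ≤ tz m := by
  rw [tz_odd h]; omega

-- PySem.Int.band (~n) (n+1) as a Nat expression, n ≥ 0
theorem band_not_nonneg (n : Int) (h : 0 ≤ n) :
    PySem.Int.band (Int.not n) (n + 1) = (((n.toNat + 1) - ((n.toNat + 1) &&& n.toNat) : Nat) : Int) := by
  obtain ⟨m, rfl⟩ := Int.eq_ofNat_of_zero_le h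
  show PySem.Int.band (Int.negSucc m) ((m : Int) + 1) = _
  rw [PySem.Int.band]
  have h1 : ¬ (0 : Int) ≤ Int.negSucc m := by omega
  have h2 : (0 : Int) ≤ (m : Int) + 1 := by omega
  rw [if_neg h1, if_pos h2]
  have h3 : ((m : Int) + 1).toNat = m + 1 := by omega
  have h4 : (-(Int.negSucc m) - 1).toNat = m := by simp [Int.negSucc_eq]
  rw [h3, h4]
  simp

-- the &&& fact used on both signs: (2t+1) &&& 2t = 2t
theorem and_pred_even (t : Nat) : (2 * t + 1) &&& (2 * t) = 2 * t := by
  have e : 2 * t = 2 * t + 0 := by ring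
  conv_lhs => rw [e]
  rw [land_bit t t 1 0 (by omega) (by omega), Nat.and_self]
  rfl

-- band (~n) (n+1) = 1 for even n (any sign)
theorem band_not_even (n : Int) (h : PySem.Int.mod n 2 = 0) :
    PySem.Int.band (Int.not n) (n + 1) = 1 := by
  have hdvd : (2 : Int) ∣ n := (PySem.Int.mod_eq_zero_iff_dvd n 2).mp h
  match n, hdvd with
  | Int.ofNat m, hdvd =>
      simp only [Int.ofNat_eq_natCast] at hdvd ⊢
      rw [band_not_nonneg _ (Int.natCast_nonneg m)]
      have hm : m % 2 = 0 := by omega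
      obtain ⟨t, rfl⟩ : ∃ t, m = 2 * t := ⟨m / 2, by omega⟩
      have : (2 * t + 1) &&& (2 * t) = 2 * t := and_pred_even t
      simp only [Int.toNat_natCast]
      omega
  | Int.negSucc j, hdvd =>
      have hj : j % 2 = 1 := by
        rcases hdvd with ⟨c, hc⟩
        rw [Int.negSucc_eq] at hc
        omega
      obtain ⟨t, rfl⟩ : ∃ t, j = 2 * t + 1 := ⟨j / 2, by omega⟩
      show PySem.Int.band (Int.ofNat (2 * t + 1)) (Int.negSucc (2 * t + 1) + 1) = 1
      rw [PySem.Int.band]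
      have h1 : (0 : Int) ≤ Int.ofNat (2 * t + 1) := by
        simp only [Int.ofNat_eq_natCast]; exact Int.natCast_nonneg _
      have h2 : ¬ (0 : Int) ≤ Int.negSucc (2 * t + 1) + 1 := by
        rw [Int.negSucc_eq]; omega
      rw [if_pos h1, if_neg h2]
      have h3 : (Int.ofNat (2 * t + 1)).toNat = 2 * t + 1 := by
        simp only [Int.ofNat_eq_natCast]; omega
      have h4 : (-(Int.negSucc (2 * t + 1) + 1) - 1).toNat = 2 * t := by
        rw [Int.negSucc_eq]; omega
      rw [h3, h4, and_pred_even t]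
      omega

-- band (~n) (n+1) = 2 ^ tz for odd n ≥ 0
theorem band_not_odd (n : Int) (h0 : 0 ≤ n) (_h : PySem.Int.mod n 2 = 1) :
    PySem.Int.band (Int.not n) (n + 1) = ((2 ^ tz n.toNat : Nat) : Int) := by
  rw [band_not_nonneg n h0, lowbit_eq]

-- ---- A-side: value of the spliced binary string ----

theorem intBase2_cons_zero (cs : List Char) : intBase2 ('0' :: cs) = intBase2 cs := by
  simp [intBase2]

theorem intBase2_append_singleton (xs : List Char) (c : Char) :
    intBase2 (xs ++ [c]) = 2 * intBase2 xs + (if c = '1' then 1 else 0) := by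
  simp [intBase2, List.foldl_append]

theorem intBase2_toDigits (m : Nat) : intBase2 (Nat.toDigits 2 m) = (m : Int) := by
  induction m using Nat.strong_induction_on with
  | _ m ih =>
    by_cases hm : m < 2
    · interval_cases m <;> decide
    · rw [Nat.toDigits_of_base_le (by omega) (by omega), intBase2_append_singleton,
        ih (m / 2) (by omega)]
      rcases Nat.mod_two_eq_zero_or_one m with h | h <;> rw [h] <;>
        simp [Nat.digitChar] <;> omega

theorem toDigits_odd (m : Nat) (h : m % 2 = 1) :
    ∃ ys, Nat.toDigits 2 m = ys ++ ['1'] := by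
  by_cases hm : m < 2
  · exact ⟨[], by interval_cases m <;> simp_all <;> rfl⟩
  · refine ⟨Nat.toDigits 2 (m / 2), ?_⟩
    rw [Nat.toDigits_of_base_le (by omega) (by omega), h]
    rfl

theorem rindex0_append_one (xs : List Char) : rindex0 (xs ++ ['1']) = rindex0 xs := by
  simp [rindex0, List.findIdx_cons]
  omega

theorem rindex0_append_zero (xs : List Char) : rindex0 (xs ++ ['0']) = xs.length := by
  simp [rindex0, List.findIdx_cons]

theorem rindex0_le (xs : List Char) : rindex0 xs ≤ xs.length - 1 := by
  simp [rindex0]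

-- the spliced value for odd m
theorem spliceVal (m : Nat) (hm : m % 2 = 1) :
    intBase2 (('0' :: Nat.toDigits 2 m).take (rindex0 ('0' :: Nat.toDigits 2 m)) ++ ['1', '0'] ++
      ('0' :: Nat.toDigits 2 m).drop (rindex0 ('0' :: Nat.toDigits 2 m) + 2)) =
    (m : Int) + 2 ^ (tz m - 1) := by
  induction m using Nat.strong_induction_on with
  | _ m ih =>
    by_cases h1 : m = 1
    · subst h1
      have h0 : tz 1 = 1 := by
        rw [tz_odd (by norm_num), tz_even (by norm_num)]
      rw [h0]
      decide
    · have hm2 : 2 ≤ m := by omega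
      have hD : Nat.toDigits 2 m = Nat.toDigits 2 (m / 2) ++ ['1'] := by
        rw [Nat.toDigits_of_base_le (by norm_num) hm2, hm]; rfl
      rcases Nat.mod_two_eq_zero_or_one (m / 2) with he | ho
      · -- lowest zero bit of m is bit 1 (m % 4 = 1): the splice rewrites the final "01" to "10"
        have hq2 : 2 ≤ m / 2 := by omega
        have hD2 : Nat.toDigits 2 (m / 2) = Nat.toDigits 2 (m / 4) ++ ['0'] := by
          rw [Nat.toDigits_of_base_le (by norm_num) hq2, he, show m / 2 / 2 = m / 4 by omega]
          rfl
        have hnum : '0' :: Nat.toDigits 2 m =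
            (('0' :: Nat.toDigits 2 (m / 4)) ++ ['0']) ++ ['1'] := by
          rw [hD, hD2]; simp
        have hri : rindex0 ('0' :: Nat.toDigits 2 m) =
            ('0' :: Nat.toDigits 2 (m / 4)).length := by
          rw [hnum, rindex0_append_one, rindex0_append_zero]
        rw [hri, hnum]
        rw [List.take_append_of_le_length (by simp), List.take_left]
        rw [List.drop_of_length_le (by simp), List.append_nil]
        rw [show ('0' :: Nat.toDigits 2 (m / 4)) ++ ['1', '0'] =
          (('0' :: Nat.toDigits 2 (m / 4)) ++ ['1']) ++ ['0'] by simp]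
        rw [intBase2_append_singleton, intBase2_append_singleton, intBase2_cons_zero,
          intBase2_toDigits]
        have htz : tz m = 1 := by rw [tz_odd hm, tz_even he]
        rw [htz]
        have e1 : (if ('1' : Char) = '1' then (1 : Int) else 0) = 1 := by decide
        have e2 : (if ('0' : Char) = '1' then (1 : Int) else 0) = 0 := by decide
        rw [e1, e2]
        simp only [Nat.sub_self, pow_zero]
        omega
      · -- deeper trailing ones (m % 4 = 3): the splice happens inside the prefix for m / 2
        have ihh := ih (m / 2) (by omega) ho
        obtain ⟨ys, hys⟩ := toDigits_odd (m / 2) ho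
        have hsplit : '0' :: Nat.toDigits 2 (m / 2) = ('0' :: ys) ++ ['1'] := by
          rw [hys]; simp
        have hib : rindex0 ('0' :: Nat.toDigits 2 (m / 2)) + 2 ≤
            ('0' :: Nat.toDigits 2 (m / 2)).length := by
          have h := rindex0_le ('0' :: ys)
          rw [hsplit, rindex0_append_one]
          simp at h ⊢
          omega
        have hnum : '0' :: Nat.toDigits 2 m = ('0' :: Nat.toDigits 2 (m / 2)) ++ ['1'] := by
          rw [hD]; simp
        have hri : rindex0 ('0' :: Nat.toDigits 2 m) =
            rindex0 ('0' :: Nat.toDigits 2 (m / 2)) := by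
          rw [hnum, rindex0_append_one]
        rw [hri, hnum]
        rw [List.take_append_of_le_length (by omega), List.drop_append,
          show rindex0 ('0' :: Nat.toDigits 2 (m / 2)) + 2 -
            ('0' :: Nat.toDigits 2 (m / 2)).length = 0 by omega, List.drop_zero]
        rw [show ('0' :: Nat.toDigits 2 (m / 2)).take (rindex0 ('0' :: Nat.toDigits 2 (m / 2))) ++
            ['1', '0'] ++
            (('0' :: Nat.toDigits 2 (m / 2)).drop (rindex0 ('0' :: Nat.toDigits 2 (m / 2)) + 2) ++
              ['1']) =
          (('0' :: Nat.toDigits 2 (m / 2)).take (rindex0 ('0' :: Nat.toDigits 2 (m / 2))) ++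
            ['1', '0'] ++
            ('0' :: Nat.toDigits 2 (m / 2)).drop (rindex0 ('0' :: Nat.toDigits 2 (m / 2)) + 2)) ++
            ['1'] by simp]
        rw [intBase2_append_singleton, ihh]
        obtain ⟨t, ht⟩ : ∃ t, tz (m / 2) = t + 1 := ⟨tz (m / 2) - 1, by
          have := tz_pos ho; omega⟩
        have htz : tz m = t + 2 := by rw [tz_odd hm, ht]
        rw [ht, htz]
        have hme : (m : Int) = 2 * ((m / 2 : Nat) : Int) + 1 := by push_cast; omega
        rw [hme]
        push_cast
        ring

-- ---- pointwise step equality ----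

theorem step_eq (n : Int) (hp : n < 0 → PySem.Int.mod n 2 = 0) :
    (if PySem.Int.mod n 2 = 0 then n + 1
     else
       intBase2 (('0' :: (PySem.Int.toBinChars0b n).drop 2).take
            (rindex0 ('0' :: (PySem.Int.toBinChars0b n).drop 2)) ++ ['1', '0'] ++
          ('0' :: (PySem.Int.toBinChars0b n).drop 2).drop
            (rindex0 ('0' :: (PySem.Int.toBinChars0b n).drop 2) + 2))) =
    n + max ((PySem.Int.band (Int.not n) (n + 1)) >>> (1 : Nat)) 1 := by
  rcases PySem.Int.mod_two_eq n with h | h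
  · rw [if_pos h, band_not_even n h]
    rw [show ((1 : Int) >>> (1 : Nat)) = 0 by decide]
    norm_num
  · rw [if_neg (by rw [h]; norm_num)]
    have hn : 0 ≤ n := by
      by_contra hneg
      push Not at hneg
      rw [hp hneg] at h
      norm_num at h
    have hbin : '0' :: (PySem.Int.toBinChars0b n).drop 2 = '0' :: Nat.toDigits 2 n.toNat := by
      rw [PySem.Int.toBinChars0b, if_neg (by omega)]
      rfl
    have hmn : n.toNat % 2 = 1 := by
      rw [PySem.Int.mod_eq_emod_of_pos (by norm_num)] at h
      omega
    rw [hbin, spliceVal n.toNat hmn, band_not_odd n hn h]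
    obtain ⟨t, ht⟩ : ∃ t, tz n.toNat = t + 1 := ⟨tz n.toNat - 1, by have := tz_pos hmn; omega⟩
    rw [ht]
    rw [show (((2 ^ (t + 1) : Nat) : Int) >>> (1 : Nat)) = ((2 ^ (t + 1) >>> 1 : Nat) : Int)
      from rfl]
    rw [show (2 ^ (t + 1) >>> 1 : Nat) = 2 ^ t by rw [Nat.shiftRight_one]; omega]
    rw [max_eq_left (by exact_mod_cast Nat.one_le_two_pow)]
    rw [Int.toNat_of_nonneg hn]
    push_cast
    ring

-- ===== VERDICT (by name: the statement is the Claim_ definition above) =====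
theorem solution_spec : Claim_equal_solution := by
  intro numbers _ hpre
  unfold Spec_solution solution solution_alt
  have hshape : ∀ (acc : List Int),
      numbers.foldl (fun answer number =>
        if PySem.Int.mod number 2 = 0 then
          answer ++ [number + 1]
        else
          let num := '0' :: (PySem.Int.toBinChars0b number).drop 2
          let num2 := num.take (rindex0 num) ++ ['1', '0'] ++ num.drop (rindex0 num + 2)
          answer ++ [intBase2 num2]) acc =
      acc ++ numbers.map (fun n =>
        if PySem.Int.mod n 2 = 0 then n + 1
        else
          intBase2 (('0' :: (PySem.Int.toBinChars0b n).drop 2).take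
              (rindex0 ('0' :: (PySem.Int.toBinChars0b n).drop 2)) ++ ['1', '0'] ++
            ('0' :: (PySem.Int.toBinChars0b n).drop 2).drop
              (rindex0 ('0' :: (PySem.Int.toBinChars0b n).drop 2) + 2))) := by
    intro acc
    rw [← PySem.List.foldl_append_singleton_eq_map]
    congr 1
    funext answer number
    by_cases h : PySem.Int.mod number 2 = 0
    · rw [if_pos h, if_pos h]
    · rw [if_neg h, if_neg h]
  rw [hshape []]
  simp only [List.nil_append]
  exact List.map_congr_left (fun n hn => step_eq n (hpre n hn))
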